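-- pv_equiv track=rewrite | github.com/debugevent90901/courseArchive | ECE365/genomics/Genomics_Lab1/main.py | check_impurity
-- ===== SOURCE A (Python) =====
-- def check_impurity(dna_reads):
--     '''
--     Input - list of dna reads
--     Output - list of reads which have impurities, a set of impure chars
--     '''
--     # start code here
--     standardCharSet = set(["A", "C", "G", "T"])
--     impurityList = []
--     impureCharList = []
--     for i in dna_reads:
--         caseSensitive = i.replace("a", "A").replace("c", "C").replace("g", "G").replace("t", "T")
--         charSet = set(list(caseSensitive))
--         if charSet - standardCharSet != set():
--             impurityList.append(i)
--             impureCharList.extend(list(charSet - standardCharSet))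
--     return impurityList, set(impureCharList)
-- ===== SOURCE B (Python) =====
-- def check_impurity(dna_reads):
--     '''
--     Input - list of dna reads
--     Output - list of reads which have impurities, a set of impure chars
--     '''
--     valid = set("ACGTacgt")
--     impurity_list = [r for r in dna_reads if any(c not in valid for c in r)]
--     impure_chars = {c for r in dna_reads for c in r if c not in valid}
--     return impurity_list, impure_chars
-- ===== Notes on version B (the rewrite author's own statement) =====
-- stated objective: simpler
-- what changed: Drops the replace-chain case normalization and per-read set differences: B filters reads by a direct any-membership test against set('ACGTacgt') and collects impure characters with a single character-level set comprehension (a/c/g/t can never be impure, so no case-folding is needed).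
import Mathlib
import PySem

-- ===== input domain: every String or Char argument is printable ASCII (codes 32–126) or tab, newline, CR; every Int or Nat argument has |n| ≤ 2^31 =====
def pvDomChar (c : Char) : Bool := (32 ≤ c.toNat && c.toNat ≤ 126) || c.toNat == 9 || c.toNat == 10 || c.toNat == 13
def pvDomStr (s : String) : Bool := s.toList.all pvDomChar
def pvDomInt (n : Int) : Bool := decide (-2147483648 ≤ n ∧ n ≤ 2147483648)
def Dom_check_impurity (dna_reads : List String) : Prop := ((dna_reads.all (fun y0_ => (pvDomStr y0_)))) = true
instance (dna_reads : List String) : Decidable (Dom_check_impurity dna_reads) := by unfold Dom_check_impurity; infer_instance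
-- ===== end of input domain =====

-- B drops A's replace-chain case normalization and per-read set differences, testing each
-- character directly against set('ACGTacgt'); objective: simpler.


-- ===== PORT A =====
def check_impurity (dna_reads : List String) : List String × List String :=
  let standardCharSet : PySem.Set Char := PySem.Set.ofList ['A', 'C', 'G', 'T']
  let st := dna_reads.foldl (fun (st : List String × List Char) i =>
    let caseSensitive :=
      PySem.Str.replace (PySem.Str.replace (PySem.Str.replace (PySem.Str.replace i "a" "A") "c" "C") "g" "G") "t" "T"
    let charSet : PySem.Set Char := PySem.Set.ofList caseSensitive.toList
    let d := PySem.Set.diff charSet standardCharSet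
    if d ≠ [] then (st.1 ++ [i], st.2 ++ d) else st) ([], [])
  (st.1, List.map (fun c => String.mk [c]) (PySem.Set.ofList st.2))

-- ===== PORT B =====
def check_impurity_alt (dna_reads : List String) : List String × List String :=
  let valid : List Char := "ACGTacgt".toList
  let impurity_list := dna_reads.filter (fun r => r.toList.any (fun c => !valid.contains c))
  let impure_chars : PySem.Set Char :=
    dna_reads.foldl (fun s r =>
      r.toList.foldl (fun s c => if !valid.contains c then PySem.Set.add s c else s) s) PySem.Set.empty
  (impurity_list, List.map (fun c => String.mk [c]) impure_chars)

-- ===== PRECONDITION & SPEC =====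
def Spec_check_impurity (dna_reads : List String) (out : List String × List String) : Prop := out = check_impurity_alt dna_reads
instance (dna_reads : List String) (out : List String × List String) : Decidable (Spec_check_impurity dna_reads out) := by unfold Spec_check_impurity; infer_instance

-- ===== CLAIM (what is proved, stated in full; the proofs are below) =====
def Claim_equal_check_impurity : Prop := ∀ (dna_reads : List String), Dom_check_impurity dna_reads → Spec_check_impurity dna_reads (check_impurity dna_reads)

-- ===== LEMMAS AND PROOFS =====

-- a char is "impure" iff it is none of ACGTacgt (B's test, stated on chars)
def impureChar (c : Char) : Bool := !("ACGTacgt".toList).contains c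

-- the effect of A's replace chain on one character
def normChar (c : Char) : Char :=
  if c = 'a' then 'A' else if c = 'c' then 'C' else if c = 'g' then 'G' else if c = 't' then 'T' else c

theorem replace_go_single (a b : Char) :
    ∀ (fuel : Nat) (l acc : List Char), l.length ≤ fuel →
      PySem.Chars.replace.go [a] [b] fuel l acc = acc.reverse ++ l.map (fun c => if c = a then b else c) := by
  intro fuel
  induction fuel with
  | zero =>
    intro l acc h
    have : l = [] := List.eq_nil_of_length_eq_zero (Nat.le_zero.mp h)
    subst this
    simp [PySem.Chars.replace.go]
  | succ n ih =>
    intro l acc h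
    cases l with
    | nil => simp [PySem.Chars.replace.go]
    | cons c t =>
      have hlen : t.length ≤ n := by simpa using h
      simp only [PySem.Chars.replace.go, List.isPrefixOf]
      by_cases hc : a == c
      · have hac : a = c := by simpa using hc
        subst hac
        simp only [hc, Bool.and_true, if_pos]
        rw [show List.drop (List.length [a]) (a :: t) = t from rfl]
        rw [ih _ _ hlen]
        simp
      · have hca : ¬ c = a := fun e => hc (by simp [e])
        rw [if_neg (by simp [hc])]
        rw [ih _ _ hlen]
        simp [hca]

theorem replace_single (a b : Char) (l : List Char) :
    PySem.Chars.replace l [a] [b] = l.map (fun c => if c = a then b else c) := by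
  unfold PySem.Chars.replace
  rw [show ([a] : List Char).isEmpty = false from rfl, if_neg Bool.false_ne_true]
  have := replace_go_single a b l.length l [] (le_refl _)
  simpa using this

-- the replace chain of A, char-level
theorem chain_toList (i : String) :
    (PySem.Str.replace (PySem.Str.replace (PySem.Str.replace (PySem.Str.replace i "a" "A") "c" "C") "g" "G") "t" "T").toList
      = i.toList.map normChar := by
  simp only [PySem.Str.toList_replace]
  rw [show ("a" : String).toList = ['a'] from rfl, show ("A" : String).toList = ['A'] from rfl]
  rw [show ("c" : String).toList = ['c'] from rfl, show ("C" : String).toList = ['C'] from rfl]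
  rw [show ("g" : String).toList = ['g'] from rfl, show ("G" : String).toList = ['G'] from rfl]
  rw [show ("t" : String).toList = ['t'] from rfl, show ("T" : String).toList = ['T'] from rfl]
  rw [replace_single, replace_single, replace_single, replace_single]
  simp only [List.map_map]
  apply List.map_congr_left
  intro c _
  simp only [Function.comp]
  unfold normChar
  by_cases h1 : c = 'a' <;> by_cases h2 : c = 'c' <;> by_cases h3 : c = 'g' <;> by_cases h4 : c = 't' <;>
    simp_all

theorem norm_of_impure (c : Char) (h : impureChar c = true) : normChar c = c := by
  unfold impureChar at h
  have hm : c ∉ ("ACGTacgt".toList) := by simpa using h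
  have h1 : ¬ c = 'a' := fun e => hm (e ▸ (by decide : ('a' : Char) ∈ "ACGTacgt".toList))
  have h2 : ¬ c = 'c' := fun e => hm (e ▸ (by decide : ('c' : Char) ∈ "ACGTacgt".toList))
  have h3 : ¬ c = 'g' := fun e => hm (e ▸ (by decide : ('g' : Char) ∈ "ACGTacgt".toList))
  have h4 : ¬ c = 't' := fun e => hm (e ▸ (by decide : ('t' : Char) ∈ "ACGTacgt".toList))
  unfold normChar
  rw [if_neg h1, if_neg h2, if_neg h3, if_neg h4]

theorem contains_norm (c : Char) :
    PySem.Set.contains (['A', 'C', 'G', 'T'] : PySem.Set Char) (normChar c) = !(impureChar c) := by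
  unfold normChar impureChar
  by_cases h1 : c = 'a' <;> by_cases h2 : c = 'c' <;> by_cases h3 : c = 'g' <;> by_cases h4 : c = 't'
  all_goals (try (subst h1)) <;> (try (subst h2)) <;> (try (subst h3)) <;> (try (subst h4))
  all_goals try decide
  rw [if_neg h1, if_neg h2, if_neg h3, if_neg h4, Bool.not_not]
  show List.contains ['A', 'C', 'G', 'T'] c = List.contains "ACGTacgt".toList c
  have hl : "ACGTacgt".toList = ['A', 'C', 'G', 'T', 'a', 'c', 'g', 't'] := rfl
  rw [hl]
  by_cases hA : c = 'A' <;> by_cases hC : c = 'C' <;> by_cases hG : c = 'G' <;> by_cases hT : c = 'T' <;>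
    simp_all

theorem foldl_add_set_add {α : Type} [BEq α] [LawfulBEq α] (s t : PySem.Set α) (x : α) :
    List.foldl PySem.Set.add s (PySem.Set.add t x) = PySem.Set.add (List.foldl PySem.Set.add s t) x := by
  by_cases hm : x ∈ t
  · rw [PySem.Set.add_of_mem hm]
    have hmf : x ∈ List.foldl PySem.Set.add s t := by
      rw [PySem.Set.mem_foldl_add]
      exact Or.inr ⟨x, hm, rfl⟩
    rw [PySem.Set.add_of_mem hmf]
  · rw [PySem.Set.add_of_not_mem hm, List.foldl_append]
    rfl

theorem foldl_add_of_setlist {α : Type} [BEq α] [LawfulBEq α] (xs : List α) :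
    ∀ (s t : PySem.Set α),
      List.foldl PySem.Set.add s (List.foldl PySem.Set.add t xs)
        = List.foldl PySem.Set.add (List.foldl PySem.Set.add s t) xs := by
  induction xs with
  | nil => intro s t; rfl
  | cons x xs ih =>
    intro s t
    simp only [List.foldl_cons]
    rw [ih, foldl_add_set_add]

theorem update_ofList {α : Type} [BEq α] [LawfulBEq α] (xs : List α) (s : PySem.Set α) :
    List.foldl PySem.Set.add s (PySem.Set.ofList xs) = List.foldl PySem.Set.add s xs := by
  unfold PySem.Set.ofList
  rw [foldl_add_of_setlist]
  rfl

theorem filter_add {α : Type} [BEq α] [LawfulBEq α] (s : PySem.Set α) (x : α) (p : α → Bool) :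
    (PySem.Set.add s x).filter p = if p x then PySem.Set.add (s.filter p) x else s.filter p := by
  by_cases hm : x ∈ s
  · rw [PySem.Set.add_of_mem hm]
    by_cases hp : p x = true
    · rw [if_pos hp, PySem.Set.add_of_mem (List.mem_filter.mpr ⟨hm, hp⟩)]
    · rw [if_neg hp]
  · rw [PySem.Set.add_of_not_mem hm, List.filter_append]
    by_cases hp : p x = true
    · rw [if_pos hp]
      have hmf : x ∉ List.filter p s := fun hx => hm (List.mem_of_mem_filter hx)
      rw [PySem.Set.add_of_not_mem hmf]
      simp [hp]
    · rw [if_neg hp]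
      have : List.filter p [x] = [] := by simp [hp]
      rw [this, List.append_nil]

theorem foldl_add_filter {α : Type} [BEq α] [LawfulBEq α] (p : α → Bool) (l : List α) :
    ∀ (s : PySem.Set α),
      (List.foldl PySem.Set.add s l).filter p = List.foldl PySem.Set.add (s.filter p) (l.filter p) := by
  induction l with
  | nil => intro s; rfl
  | cons x t ih =>
    intro s
    simp only [List.foldl_cons, List.filter_cons]
    rw [ih, filter_add]
    by_cases hp : p x = true
    · rw [if_pos hp, if_pos hp, List.foldl_cons]
    · rw [if_neg hp, if_neg hp]

theorem ofList_filter {α : Type} [BEq α] [LawfulBEq α] (p : α → Bool) (l : List α) :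
    (PySem.Set.ofList l).filter p = PySem.Set.ofList (l.filter p) := by
  unfold PySem.Set.ofList
  rw [foldl_add_filter]
  rfl

theorem ofList_eq_nil_iff {α : Type} [BEq α] [LawfulBEq α] (l : List α) :
    PySem.Set.ofList l = [] ↔ l = [] := by
  constructor
  · intro h
    cases l with
    | nil => rfl
    | cons x t =>
      exfalso
      have hx : x ∈ PySem.Set.ofList (x :: t) := (PySem.Set.mem_ofList _ _).mpr (List.mem_cons_self)
      rw [h] at hx
      exact (List.not_mem_nil).elim hx
  · intro h; subst h; rfl

-- A's per-read set difference, characterized by B's character test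
theorem diff_eq (i : String) :
    PySem.Set.diff
        (PySem.Set.ofList
          ((PySem.Str.replace (PySem.Str.replace (PySem.Str.replace (PySem.Str.replace i "a" "A") "c" "C") "g" "G") "t" "T").toList))
        (PySem.Set.ofList ['A', 'C', 'G', 'T'])
      = PySem.Set.ofList (i.toList.filter impureChar) := by
  rw [chain_toList]
  unfold PySem.Set.diff
  have hstd : (PySem.Set.ofList ['A', 'C', 'G', 'T'] : PySem.Set Char) = ['A', 'C', 'G', 'T'] := by decide
  rw [hstd, ofList_filter, List.filter_map]
  have h1 : (List.filter ((fun x => !PySem.Set.contains ['A', 'C', 'G', 'T'] x) ∘ normChar) i.toList)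
      = List.filter impureChar i.toList := by
    apply List.filter_congr
    intro c _
    show (!PySem.Set.contains ['A', 'C', 'G', 'T'] (normChar c)) = impureChar c
    rw [contains_norm, Bool.not_not]
  rw [h1]
  have h2 : List.map normChar (List.filter impureChar i.toList) = List.filter impureChar i.toList := by
    conv_rhs => rw [← List.map_id (List.filter impureChar i.toList)]
    apply List.map_congr_left
    intro c hc
    exact norm_of_impure c (List.of_mem_filter hc)
  rw [h2]

theorem diff_eq_nil_iff (i : String) :
    PySem.Set.diff
        (PySem.Set.ofList
          ((PySem.Str.replace (PySem.Str.replace (PySem.Str.replace (PySem.Str.replace i "a" "A") "c" "C") "g" "G") "t" "T").toList))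
        (PySem.Set.ofList ['A', 'C', 'G', 'T'])
      = [] ↔ i.toList.any impureChar = false := by
  rw [diff_eq, ofList_eq_nil_iff, List.filter_eq_nil_iff]
  simp [List.any_eq_false]

-- one iteration of A's loop, characterized by B's test
theorem stepA (st : List String × List Char) (i : String) :
    (let caseSensitive :=
        PySem.Str.replace (PySem.Str.replace (PySem.Str.replace (PySem.Str.replace i "a" "A") "c" "C") "g" "G") "t" "T"
     let charSet : PySem.Set Char := PySem.Set.ofList caseSensitive.toList
     let d := PySem.Set.diff charSet (PySem.Set.ofList ['A', 'C', 'G', 'T'])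
     if d ≠ [] then (st.1 ++ [i], st.2 ++ d) else st)
    = (if i.toList.any impureChar = true
       then (st.1 ++ [i], st.2 ++ PySem.Set.ofList (i.toList.filter impureChar)) else st) := by
  simp only []
  by_cases hb : i.toList.any impureChar = true
  · have hne : ¬ PySem.Set.diff
        (PySem.Set.ofList
          ((PySem.Str.replace (PySem.Str.replace (PySem.Str.replace (PySem.Str.replace i "a" "A") "c" "C") "g" "G") "t" "T").toList))
        (PySem.Set.ofList ['A', 'C', 'G', 'T']) = [] := by
      rw [diff_eq_nil_iff]
      simp [hb]
    rw [if_pos hne, if_pos hb, diff_eq]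
  · have hb' : i.toList.any impureChar = false := by
      cases h : i.toList.any impureChar
      · rfl
      · exact absurd h hb
    have heq : PySem.Set.diff
        (PySem.Set.ofList
          ((PySem.Str.replace (PySem.Str.replace (PySem.Str.replace (PySem.Str.replace i "a" "A") "c" "C") "g" "G") "t" "T").toList))
        (PySem.Set.ofList ['A', 'C', 'G', 'T']) = [] := (diff_eq_nil_iff i).mpr hb'
    rw [if_neg (not_not_intro heq), if_neg hb]

-- A's loop, unrolled into B's two shapes
theorem loopA (reads : List String) :
    ∀ (accL : List String) (accC : List Char),
      reads.foldl (fun (st : List String × List Char) i =>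
        let caseSensitive :=
          PySem.Str.replace (PySem.Str.replace (PySem.Str.replace (PySem.Str.replace i "a" "A") "c" "C") "g" "G") "t" "T"
        let charSet : PySem.Set Char := PySem.Set.ofList caseSensitive.toList
        let d := PySem.Set.diff charSet (PySem.Set.ofList ['A', 'C', 'G', 'T'])
        if d ≠ [] then (st.1 ++ [i], st.2 ++ d) else st) (accL, accC)
      = (accL ++ reads.filter (fun r => r.toList.any impureChar),
         accC ++ reads.flatMap (fun r => PySem.Set.ofList (r.toList.filter impureChar))) := by
  induction reads with
  | nil => intro accL accC; simp
  | cons r t ih =>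
    intro accL accC
    rw [List.foldl_cons, stepA (accL, accC) r, List.filter_cons, List.flatMap_cons]
    by_cases hb : r.toList.any impureChar = true
    · rw [if_pos hb, ih, if_pos hb]
      simp [List.append_assoc]
    · have hb' : r.toList.any impureChar = false := Bool.eq_false_iff.mpr (fun h => hb h)
      rw [if_neg hb, ih]
      rw [hb']
      have hnil : PySem.Set.ofList (r.toList.filter impureChar) = [] := by
        rw [ofList_eq_nil_iff, List.filter_eq_nil_iff]
        intro a ha
        simpa using (List.any_eq_false.mp hb') a ha
      rw [hnil]
      simp

-- B's inner character loop collects the impure characters of one read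
theorem loopB_inner (l : List Char) :
    ∀ (s : PySem.Set Char),
      l.foldl (fun s c => if impureChar c then PySem.Set.add s c else s) s
        = List.foldl PySem.Set.add s (l.filter impureChar) := by
  induction l with
  | nil => intro s; rfl
  | cons c t ih =>
    intro s
    rw [List.foldl_cons, List.filter_cons]
    by_cases hp : impureChar c = true
    · rw [if_pos hp, if_pos hp, List.foldl_cons, ih]
    · rw [if_neg hp, if_neg hp, ih]

theorem loopB (reads : List String) :
    ∀ (s : PySem.Set Char),
      reads.foldl (fun s r =>
          r.toList.foldl (fun s c => if impureChar c then PySem.Set.add s c else s) s) s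
        = List.foldl PySem.Set.add s (reads.flatMap (fun r => r.toList.filter impureChar)) := by
  induction reads with
  | nil => intro s; rfl
  | cons r t ih =>
    intro s
    rw [List.foldl_cons, List.flatMap_cons, List.foldl_append, loopB_inner, ih]

-- deduplicating each read's contribution first does not change the final set
theorem ofList_flatMap_ofList (g : String → List Char) (reads : List String) :
    ∀ (s : PySem.Set Char),
      List.foldl PySem.Set.add s (reads.flatMap (fun r => PySem.Set.ofList (g r)))
        = List.foldl PySem.Set.add s (reads.flatMap g) := by
  induction reads with
  | nil => intro s; rfl
  | cons r t ih =>
    intro s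
    simp only [List.flatMap_cons, List.foldl_append]
    rw [update_ofList, ih]

-- B's port lambdas, written with impureChar (definitional equalities)
theorem predB_any_eq :
    (fun (r : String) => r.toList.any (fun c => !("ACGTacgt".toList).contains c))
      = (fun (r : String) => r.toList.any impureChar) := rfl

theorem foldB_eq :
    (fun (s : PySem.Set Char) (r : String) =>
        r.toList.foldl (fun s c => if !("ACGTacgt".toList).contains c then PySem.Set.add s c else s) s)
      = (fun (s : PySem.Set Char) (r : String) =>
        r.toList.foldl (fun s c => if impureChar c then PySem.Set.add s c else s) s) := rfl

-- ===== VERDICT (by name: the statement is the Claim_ definition above) =====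
theorem check_impurity_spec : Claim_equal_check_impurity := by
  intro dna_reads _
  unfold Spec_check_impurity check_impurity check_impurity_alt
  simp only []
  rw [loopA dna_reads [] [], predB_any_eq, foldB_eq, loopB dna_reads PySem.Set.empty]
  simp only [List.nil_append]
  refine Prod.ext rfl ?_
  simp only []
  congr 1
  have h1 := ofList_flatMap_ofList (fun r => r.toList.filter impureChar) dna_reads PySem.Set.empty
  unfold PySem.Set.ofList
  simpa [PySem.Set.empty] using h1
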